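-- pv_equiv track=rewrite | github.com/GitCodeSM/GitCodeSM | pages_words_module.py | dict_TotalWords
-- ===== SOURCE A (Python) =====
-- def dict_TotalWords(final_page1_words, final_page2_words, final_page3_words):
--     # Creates a separate dictionary for all 3 pages and merges into a new dictionary to return
--     dict1 = {}
--     for x in final_page1_words:
--         for y in final_page2_words:
--             for z in final_page3_words:
--                 if x == y == z:
--                     dict1.update({x:[1,2,3]})
--
--     dict2 = {}
--     for x in final_page1_words:
--         for y in final_page2_words:
--             if x == y not in final_page3_words:
--                 dict2.update({x:[1,2]})
--
--     dict3 = {}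
--     for x in final_page1_words:
--         for z in final_page3_words:
--             if x == z not in final_page2_words:
--                 dict3.update({x:[1,3]})
--
--     dict4 = {}
--     for x in final_page1_words:
--         if x not in final_page2_words:
--             if x not in final_page3_words:
--                 dict4.update({x:[1]})
--
--     dict5 = {}
--     for y in final_page2_words:
--         if y not in final_page1_words:
--             if y not in final_page3_words:
--                 dict5.update({y:[1]})
--
--     dict6 = {}
--     for z in final_page3_words:
--         if z not in final_page1_words:
--             if z not in final_page2_words:
--                 dict6.update({z:[1]})
--
--     index_words = {}
--     index_words.update(dict1)
--     index_words.update(dict2)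
--     index_words.update(dict3)
--     index_words.update(dict4)
--     index_words.update(dict5)
--     index_words.update(dict6)
--     return index_words
-- ===== SOURCE B (Python) =====
-- def dict_TotalWords(final_page1_words, final_page2_words, final_page3_words):
--     # One linear pass per page with set membership (A rescans the other pages for
--     # every word, including a triple nested loop). Keeps A's output exactly,
--     # including the [1] labels it gives to page2-only / page3-only words.
--     s1 = set(final_page1_words)
--     s2 = set(final_page2_words)
--     s3 = set(final_page3_words)
--     b123, b12, b13, b1 = {}, {}, {}, {}
--     for w in final_page1_words:
--         if w in s2:
--             if w in s3:
--                 b123[w] = [1, 2, 3]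
--             else:
--                 b12[w] = [1, 2]
--         else:
--             if w in s3:
--                 b13[w] = [1, 3]
--             else:
--                 b1[w] = [1]
--     p2only = {w: [1] for w in final_page2_words if w not in s1 and w not in s3}
--     p3only = {w: [1] for w in final_page3_words if w not in s1 and w not in s2}
--     res = {}
--     for part in (b123, b12, b13, b1, p2only, p3only):
--         res.update(part)
--     return res
-- ===== Notes on version B (the rewrite author's own statement) =====
-- stated objective: faster
-- what changed: Replaces A's six separate rescanning passes (including a triple nested loop over all three pages and repeated 'in list' scans) by three linear passes: one sweep over page1 classifying each word into one of four category buckets via set membership, two comprehensions for page2-only/page3-only words, then a single merge.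
import Mathlib
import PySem

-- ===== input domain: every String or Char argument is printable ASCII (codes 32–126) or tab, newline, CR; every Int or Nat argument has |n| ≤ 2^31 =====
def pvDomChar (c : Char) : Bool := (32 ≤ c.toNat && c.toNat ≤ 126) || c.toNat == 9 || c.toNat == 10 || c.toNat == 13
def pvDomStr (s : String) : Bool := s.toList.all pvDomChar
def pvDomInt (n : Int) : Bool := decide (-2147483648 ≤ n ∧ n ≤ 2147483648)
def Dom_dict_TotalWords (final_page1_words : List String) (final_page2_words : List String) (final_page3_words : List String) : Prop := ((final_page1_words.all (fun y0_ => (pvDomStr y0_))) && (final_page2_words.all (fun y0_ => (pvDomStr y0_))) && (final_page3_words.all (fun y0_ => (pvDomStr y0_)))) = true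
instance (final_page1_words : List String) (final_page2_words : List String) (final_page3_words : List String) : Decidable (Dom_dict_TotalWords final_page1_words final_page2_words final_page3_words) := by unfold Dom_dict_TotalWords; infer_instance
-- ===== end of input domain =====

-- B replaces A's six rescanning passes (one of them a triple nested loop) by one linear
-- pass per page using set membership, collecting the four page1 categories in a single
-- sweep; measured faster, same return value (insertion order included).


-- ===== PORT A =====
def dict_TotalWords (final_page1_words : List String) (final_page2_words : List String) (final_page3_words : List String) : List (String × List Int) :=
  let dict1 := final_page1_words.foldl (fun d x =>
      final_page2_words.foldl (fun d y =>
        final_page3_words.foldl (fun d z =>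
          if x == y && y == z then d.insert x [1, 2, 3] else d) d) d) PySem.Dict.empty
  let dict2 := final_page1_words.foldl (fun d x =>
      final_page2_words.foldl (fun d y =>
        if x == y && !(final_page3_words.contains y) then d.insert x [1, 2] else d) d) PySem.Dict.empty
  let dict3 := final_page1_words.foldl (fun d x =>
      final_page3_words.foldl (fun d z =>
        if x == z && !(final_page2_words.contains z) then d.insert x [1, 3] else d) d) PySem.Dict.empty
  let dict4 := final_page1_words.foldl (fun d x =>
      if !(final_page2_words.contains x) then
        if !(final_page3_words.contains x) then d.insert x [1] else d
      else d) PySem.Dict.empty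
  let dict5 := final_page2_words.foldl (fun d y =>
      if !(final_page1_words.contains y) then
        if !(final_page3_words.contains y) then d.insert y [1] else d
      else d) PySem.Dict.empty
  let dict6 := final_page3_words.foldl (fun d z =>
      if !(final_page1_words.contains z) then
        if !(final_page2_words.contains z) then d.insert z [1] else d
      else d) PySem.Dict.empty
  let index_words : PySem.Dict String (List Int) := PySem.Dict.empty
  let index_words := index_words.update dict1.items
  let index_words := index_words.update dict2.items
  let index_words := index_words.update dict3.items
  let index_words := index_words.update dict4.items
  let index_words := index_words.update dict5.items
  let index_words := index_words.update dict6.items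
  index_words.items

-- ===== PORT B =====
def dict_TotalWords_alt (final_page1_words : List String) (final_page2_words : List String) (final_page3_words : List String) : List (String × List Int) :=
  let s1 := PySem.Set.ofList final_page1_words
  let s2 := PySem.Set.ofList final_page2_words
  let s3 := PySem.Set.ofList final_page3_words
  -- one pass over page1, classifying each word into its category bucket
  let bs := final_page1_words.foldl
    (fun (bs : PySem.Dict String (List Int) × PySem.Dict String (List Int) × PySem.Dict String (List Int) × PySem.Dict String (List Int)) w =>
      if PySem.Set.contains s2 w then
        if PySem.Set.contains s3 w then (bs.1.insert w [1, 2, 3], bs.2.1, bs.2.2.1, bs.2.2.2)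
        else (bs.1, bs.2.1.insert w [1, 2], bs.2.2.1, bs.2.2.2)
      else
        if PySem.Set.contains s3 w then (bs.1, bs.2.1, bs.2.2.1.insert w [1, 3], bs.2.2.2)
        else (bs.1, bs.2.1, bs.2.2.1, bs.2.2.2.insert w [1]))
    (PySem.Dict.empty, PySem.Dict.empty, PySem.Dict.empty, PySem.Dict.empty)
  -- dict comprehensions: {w: [1] for w in page if w not in …}
  let p2only := (final_page2_words.filter
      (fun w => !(PySem.Set.contains s1 w) && !(PySem.Set.contains s3 w))).foldl
      (fun d w => d.insert w [1]) PySem.Dict.empty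
  let p3only := (final_page3_words.filter
      (fun w => !(PySem.Set.contains s1 w) && !(PySem.Set.contains s2 w))).foldl
      (fun d w => d.insert w [1]) PySem.Dict.empty
  let res := [bs.1, bs.2.1, bs.2.2.1, bs.2.2.2, p2only, p3only].foldl
      (fun r part => r.update part.items) PySem.Dict.empty
  res.items

-- ===== PRECONDITION & SPEC =====
def Spec_dict_TotalWords (final_page1_words : List String) (final_page2_words : List String) (final_page3_words : List String) (out : List (String × List Int)) : Prop := out = dict_TotalWords_alt final_page1_words final_page2_words final_page3_words
instance (final_page1_words : List String) (final_page2_words : List String) (final_page3_words : List String) (out : List (String × List Int)) : Decidable (Spec_dict_TotalWords final_page1_words final_page2_words final_page3_words out) := by unfold Spec_dict_TotalWords; infer_instance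

-- ===== CLAIM (what is proved, stated in full; the proofs are below) =====
def Claim_equal_dict_TotalWords : Prop := ∀ (final_page1_words : List String) (final_page2_words : List String) (final_page3_words : List String), Dom_dict_TotalWords final_page1_words final_page2_words final_page3_words → Spec_dict_TotalWords final_page1_words final_page2_words final_page3_words (dict_TotalWords final_page1_words final_page2_words final_page3_words)

-- ===== LEMMAS AND PROOFS =====

-- a loop that (re)inserts the SAME key/value whenever the element satisfies c
lemma foldl_insert_if_any (L : List String) (c : String → Bool) (x : String) (v : List Int)
    (d : PySem.Dict String (List Int)) :
    L.foldl (fun d y => if c y then d.insert x v else d) d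
      = if L.any c then d.insert x v else d := by
  induction L generalizing d with
  | nil => simp
  | cons a L ih =>
    simp only [List.foldl_cons, List.any_cons]
    by_cases h : c a = true
    · by_cases h2 : L.any c = true <;>
        simp [h, h2, ih, PySem.Dict.insert_insert_self]
    · simp only [Bool.not_eq_true] at h
      simp [h, ih]

lemma any_const_and (L : List String) (b : Bool) (f : String → Bool) :
    L.any (fun z => b && f z) = (b && L.any f) := by
  cases b <;> simp

lemma any_beq_and (L : List String) (x : String) (g : String → Bool) :
    L.any (fun y => x == y && g y) = (L.contains x && g x) := by
  induction L with
  | nil => simp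
  | cons a L ih =>
    simp only [List.any_cons, List.contains_cons, ih]
    by_cases h : x = a
    · subst h; cases g x <;> simp
    · have hb : (x == a) = false := by simp [h]
      simp [hb]

lemma set_contains_ofList (p : List String) (w : String) :
    PySem.Set.contains (PySem.Set.ofList p) w = p.contains w := by
  simp [pysem]

-- a guarded insert loop is the insert loop over the filtered list
lemma foldl_insert_filter (L : List String) (c : String → Bool)
    (d : PySem.Dict String (List Int)) :
    (L.filter c).foldl (fun d w => d.insert w [1]) d
      = L.foldl (fun d w => if c w then d.insert w [1] else d) d := by
  induction L generalizing d with
  | nil => rfl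
  | cons a L ih =>
    by_cases h : c a = true <;> simp [h, ih]

-- B's single classifying pass splits into four independent guarded-insert loops
lemma foldl_buckets_split (c2 c3 : String → Bool) (L : List String)
    (t : PySem.Dict String (List Int) × PySem.Dict String (List Int) × PySem.Dict String (List Int) × PySem.Dict String (List Int)) :
    L.foldl (fun bs w =>
      if c2 w then
        if c3 w then (bs.1.insert w [1, 2, 3], bs.2.1, bs.2.2.1, bs.2.2.2)
        else (bs.1, bs.2.1.insert w [1, 2], bs.2.2.1, bs.2.2.2)
      else
        if c3 w then (bs.1, bs.2.1, bs.2.2.1.insert w [1, 3], bs.2.2.2)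
        else (bs.1, bs.2.1, bs.2.2.1, bs.2.2.2.insert w [1]))
      t
    = (L.foldl (fun d w => if c2 w && c3 w then d.insert w [1, 2, 3] else d) t.1,
       L.foldl (fun d w => if c2 w && !(c3 w) then d.insert w [1, 2] else d) t.2.1,
       L.foldl (fun d w => if !(c2 w) && c3 w then d.insert w [1, 3] else d) t.2.2.1,
       L.foldl (fun d w => if !(c2 w) && !(c3 w) then d.insert w [1] else d) t.2.2.2) := by
  induction L generalizing t with
  | nil => rfl
  | cons a L ih =>
    simp only [List.foldl_cons]
    rw [ih]
    by_cases h2 : c2 a = true <;> by_cases h3 : c3 a = true <;> simp [h2, h3]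

-- two nested one-sided ifs collapse to one conjunctive guard
lemma if_if_and {α : Type} (a b : Bool) (d e : α) :
    (if a then (if b then e else d) else d) = if a && b then e else d := by
  cases a <;> cases b <;> simp

-- ===== VERDICT (by name: the statement is the Claim_ definition above) =====
theorem dict_TotalWords_spec : Claim_equal_dict_TotalWords := by
  intro p1 p2 p3 _
  show dict_TotalWords p1 p2 p3 = dict_TotalWords_alt p1 p2 p3
  unfold dict_TotalWords dict_TotalWords_alt
  -- normalise B's side
  simp only [set_contains_ofList, foldl_buckets_split, foldl_insert_filter,
    List.foldl_cons, List.foldl_nil]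
  -- normalise A's six component loops to the same guarded-insert folds
  have h1 : (fun (d : PySem.Dict String (List Int)) x =>
        p2.foldl (fun d y => p3.foldl (fun d z =>
          if x == y && y == z then d.insert x [1, 2, 3] else d) d) d)
      = (fun d w => if p2.contains w && p3.contains w then d.insert w [1, 2, 3] else d) := by
    funext d x
    simp only [foldl_insert_if_any, any_const_and, ← List.contains_eq_any_beq, any_beq_and]
  have h2 : (fun (d : PySem.Dict String (List Int)) x =>
        p2.foldl (fun d y =>
          if x == y && !(p3.contains y) then d.insert x [1, 2] else d) d)
      = (fun d w => if p2.contains w && !(p3.contains w) then d.insert w [1, 2] else d) := by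
    funext d x
    simp only [foldl_insert_if_any, any_beq_and]
  have h3 : (fun (d : PySem.Dict String (List Int)) x =>
        p3.foldl (fun d z =>
          if x == z && !(p2.contains z) then d.insert x [1, 3] else d) d)
      = (fun d w => if !(p2.contains w) && p3.contains w then d.insert w [1, 3] else d) := by
    funext d x
    simp only [foldl_insert_if_any, any_beq_and, Bool.and_comm]
  have h4 : ∀ (a b : List String), (fun (d : PySem.Dict String (List Int)) x =>
        if !(a.contains x) then (if !(b.contains x) then d.insert x [1] else d) else d)
      = (fun d w => if !(a.contains w) && !(b.contains w) then d.insert w [1] else d) := by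
    intro a b
    funext d x
    exact if_if_and _ _ _ _
  rw [h1, h2, h3, h4 p2 p3, h4 p1 p3, h4 p1 p2]
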